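-- pv_equiv track=rewrite | github.com/arnaupjbb/ap3v2 | pablo_exh.py | nou_cost
-- ===== SOURCE A (Python) =====
-- def nou_cost(
--     sol: list[int], millores: list[list[int]], idx: int, ce: list[int], ne: list[int]
-- ) -> tuple[int, int]:
--     M = len(ce)
--     C = len(sol)
--     nou_cost = 0
--     aprox = 0
--     for i in range(M):
--         ocupacio_estacio = 0
--         for j in range(idx, max(-1, idx - ne[i]), -1):
--             ocupacio_estacio += millores[sol[j]][i]
--         n = max(0, ocupacio_estacio - ce[i])
--         nou_cost += n
--         aprox += n*(n-1)//2
--     return nou_cost, aprox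
-- ===== SOURCE B (Python) =====
-- def nou_cost(
--     sol: list[int], millores: list[list[int]], idx: int, ce: list[int], ne: list[int]
-- ) -> tuple[int, int]:
--     M = len(ce)
--     maxne = 0
--     for i in range(M):
--         if ne[i] > maxne:
--             maxne = ne[i]
--     depth = maxne if maxne < idx + 1 else idx + 1
--     occ = [0] * M
--     for d in range(depth):
--         row = millores[sol[idx - d]]
--         occ = [occ[i] + row[i] if ne[i] > d else occ[i] for i in range(M)]
--     total = 0
--     aprox = 0
--     for i in range(M):
--         n = occ[i] - ce[i]
--         if n < 0:
--             n = 0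
--         total += n
--         aprox += n * (n - 1) // 2
--     return total, aprox
-- ===== Notes on version B (the rewrite author's own statement) =====
-- stated objective: alternative
-- what changed: B replaces A's station-major re-scan of each window (one backward pass over sol per station) by a single position-major scan that fetches each row millores[sol[idx-d]] once and updates a per-station occupancy table, then a final pass turns the table into the cost pair.
import Mathlib
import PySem

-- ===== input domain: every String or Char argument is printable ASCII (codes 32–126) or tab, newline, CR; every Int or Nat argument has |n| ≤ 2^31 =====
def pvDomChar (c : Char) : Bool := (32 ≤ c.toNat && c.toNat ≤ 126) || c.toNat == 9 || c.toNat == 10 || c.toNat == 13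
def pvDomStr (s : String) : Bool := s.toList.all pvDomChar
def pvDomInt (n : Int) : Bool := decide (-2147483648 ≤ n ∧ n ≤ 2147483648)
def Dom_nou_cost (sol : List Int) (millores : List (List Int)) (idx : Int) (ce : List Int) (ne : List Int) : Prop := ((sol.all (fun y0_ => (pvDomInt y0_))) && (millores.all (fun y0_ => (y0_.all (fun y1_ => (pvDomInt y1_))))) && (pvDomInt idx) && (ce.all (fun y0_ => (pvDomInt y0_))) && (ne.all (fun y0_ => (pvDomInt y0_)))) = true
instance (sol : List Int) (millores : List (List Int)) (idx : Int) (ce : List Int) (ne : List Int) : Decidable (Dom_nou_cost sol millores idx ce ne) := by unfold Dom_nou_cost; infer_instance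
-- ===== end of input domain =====

-- B makes one position-major scan building a per-station occupancy table (each row fetched once)
-- instead of A's per-station backward window re-scans; same results, similar cost (objective: alternative).

-- ===== PORT A =====
def nou_cost (sol : List Int) (millores : List (List Int)) (idx : Int) (ce : List Int) (ne : List Int) : Int × Int :=
  let M := ce.length
  let _C := sol.length
  (List.range M).foldl
    (fun (acc : Int × Int) (i : Nat) =>
      let ocupacio_estacio :=
        (PySem.List.pyRange idx (max (-1) (idx - ne.getD i 0)) (-1)).foldl
          (fun (o : Int) (j : Int) =>
            o + (PySem.List.pyGetD millores (PySem.List.pyGetD sol j 0) []).getD i 0)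
          0
      let n := max 0 (ocupacio_estacio - ce.getD i 0)
      (acc.1 + n, acc.2 + PySem.Int.floordiv (n * (n - 1)) 2))
    (0, 0)

-- ===== PORT B =====
def nou_cost_alt (sol : List Int) (millores : List (List Int)) (idx : Int) (ce : List Int) (ne : List Int) : Int × Int :=
  let M := ce.length
  let maxne := (List.range M).foldl (fun (m : Int) (i : Nat) => if ne.getD i 0 > m then ne.getD i 0 else m) 0
  let depth := if maxne < idx + 1 then maxne else idx + 1
  let occ :=
    (PySem.List.pyRange 0 depth 1).foldl
      (fun (occ : List Int) (d : Int) =>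
        let row := PySem.List.pyGetD millores (PySem.List.pyGetD sol (idx - d) 0) []
        (List.range M).map (fun i => if ne.getD i 0 > d then occ.getD i 0 + row.getD i 0 else occ.getD i 0))
      (List.replicate M 0)
  (List.range M).foldl
    (fun (acc : Int × Int) (i : Nat) =>
      let n := occ.getD i 0 - ce.getD i 0
      let n := if n < 0 then 0 else n
      (acc.1 + n, acc.2 + PySem.Int.floordiv (n * (n - 1)) 2))
    (0, 0)

-- ===== PRECONDITION & SPEC =====
-- every access A performs succeeds: for each station i < len(ce) and each window offset d,
-- sol[idx-d] exists, millores[sol[idx-d]] exists (Python negative-index rule), and that row has an entry i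
def pvAccOk (sol : List Int) (millores : List (List Int)) (j : Int) (i : Nat) : Bool :=
  match PySem.List.pyGet? sol j with
  | none => false
  | some s =>
    match PySem.List.pyGet? millores s with
    | none => false
    | some row => i < row.length

def Pre_nou_cost (sol : List Int) (millores : List (List Int)) (idx : Int) (ce : List Int) (ne : List Int) : Prop :=
  ce.length ≤ ne.length ∧
  ∀ i ∈ List.range ce.length, ∀ d ∈ List.range ((min (ne.getD i 0) (idx + 1)).toNat),
    pvAccOk sol millores (idx - d) i = true

instance (sol : List Int) (millores : List (List Int)) (idx : Int) (ce : List Int) (ne : List Int) : Decidable (Pre_nou_cost sol millores idx ce ne) := by unfold Pre_nou_cost; infer_instance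

def pvWitness_nou_cost : List Int × List (List Int) × Int × List Int × List Int := ([0], [[2]], 0, [1], [1])

def Spec_nou_cost (sol : List Int) (millores : List (List Int)) (idx : Int) (ce : List Int) (ne : List Int) (out : Int × Int) : Prop := out = nou_cost_alt sol millores idx ce ne
instance (sol : List Int) (millores : List (List Int)) (idx : Int) (ce : List Int) (ne : List Int) (out : Int × Int) : Decidable (Spec_nou_cost sol millores idx ce ne out) := by unfold Spec_nou_cost; infer_instance

-- ===== CLAIM (what is proved, stated in full; the proofs are below) =====
def Claim_equal_nou_cost : Prop := ∀ (sol : List Int) (millores : List (List Int)) (idx : Int) (ce : List Int) (ne : List Int), Dom_nou_cost sol millores idx ce ne → Pre_nou_cost sol millores idx ce ne → Spec_nou_cost sol millores idx ce ne (nou_cost sol millores idx ce ne)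

-- ===== LEMMAS AND PROOFS =====

-- the contribution of position j to station i (with PySem defaults; in range under Pre_)
def pvF (sol : List Int) (millores : List (List Int)) (j : Int) (i : Nat) : Int :=
  (PySem.List.pyGetD millores (PySem.List.pyGetD sol j 0) []).getD i 0

-- A's inner backward window scan is the sum of pvF over offsets d < min(ne[i], idx+1)
lemma pv_A_station (sol : List Int) (millores : List (List Int)) (idx : Int) (ne : List Int) (i : Nat) :
    (PySem.List.pyRange idx (max (-1) (idx - ne.getD i 0)) (-1)).foldl
      (fun (o : Int) (j : Int) => o + pvF sol millores j i) 0
    = ((List.range ((min (ne.getD i 0) (idx + 1)).toNat)).map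
        (fun (k : Nat) => pvF sol millores (idx - (k : Int)) i)).sum := by
  rw [PySem.List.pyRange_neg_one, List.foldl_map]
  rw [PySem.List.foldl_add]
  have h : (idx - max (-1) (idx - ne.getD i 0)).toNat = (min (ne.getD i 0) (idx + 1)).toNat := by
    omega
  rw [h, zero_add]

-- B's occupancy table after D steps, entrywise
lemma pv_occ_spec (sol : List Int) (millores : List (List Int)) (idx : Int) (ne : List Int)
    (M : Nat) (D : Nat) (i : Nat) (hi : i < M) :
    ((List.range D).foldl
       (fun (occ : List Int) (k : Nat) =>
         (List.range M).map (fun i' =>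
           if ne.getD i' 0 > (k : Int)
           then occ.getD i' 0 + pvF sol millores (idx - (k : Int)) i'
           else occ.getD i' 0))
       (List.replicate M 0)).getD i 0
    = ((List.range D).map
        (fun (k : Nat) => if ne.getD i 0 > (k : Int) then pvF sol millores (idx - (k : Int)) i else 0)).sum := by
  induction D with
  | zero => simp
  | succ D ih =>
      rw [List.range_succ, List.foldl_append, List.map_append, List.sum_append]
      simp only [List.foldl_cons, List.foldl_nil, List.map_cons, List.map_nil, List.sum_cons,
        List.sum_nil, add_zero]
      rw [List.getD_eq_getElem?_getD, List.getElem?_map, List.getElem?_range hi]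
      simp only [Option.map_some, Option.getD_some]
      rw [← ih]
      split
      · rw [List.getD_eq_getElem?_getD]
      · rw [add_zero, List.getD_eq_getElem?_getD]

-- truncating an ite-guarded sum over range D to the prefix where the guard holds
lemma pv_sum_ite_take (g : Nat → Int) (p : Nat → Prop) [DecidablePred p] :
    ∀ (D L : Nat), L ≤ D → (∀ k, k < D → (p k ↔ k < L)) →
    ((List.range D).map (fun k => if p k then g k else 0)).sum = ((List.range L).map g).sum := by
  intro D
  induction D with
  | zero => intro L hL _; interval_cases L; rfl
  | succ D ih =>
      intro L hL hp
      rw [List.range_succ, List.map_append, List.sum_append]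
      by_cases hLD : L = D + 1
      · subst hLD
        have hall : ∀ k ∈ List.range D, (if p k then g k else 0) = g k := by
          intro k hk
          rw [List.mem_range] at hk
          rw [if_pos ((hp k (by omega)).2 (by omega))]
        rw [List.map_congr_left hall]
        have hpD : p D := (hp D (by omega)).2 (by omega)
        simp [List.range_succ, hpD]
      · have hL' : L ≤ D := by omega
        have hpD : ¬ p D := by
          intro h
          have := (hp D (by omega)).1 h
          omega
        rw [ih L hL' (fun k hk => hp k (by omega))]
        simp [hpD]

-- folding the raw access expression into pvF
lemma pvF_eq (sol : List Int) (millores : List (List Int)) (j : Int) (i : Nat) :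
    pvF sol millores j i = (PySem.List.pyGetD millores (PySem.List.pyGetD sol j 0) []).getD i 0 := rfl

-- B's running maximum written with `max`
def pvMax (ne : List Int) (M : Nat) : Int :=
  (List.range M).foldl (fun (m : Int) (i : Nat) => max m (ne.getD i 0)) 0

lemma pv_maxne_eq (ne : List Int) (M : Nat) :
    (List.range M).foldl (fun (m : Int) (i : Nat) => if ne.getD i 0 > m then ne.getD i 0 else m) 0
    = pvMax ne M := by
  apply PySem.List.foldl_congr_mem
  intro m i _
  split <;> omega

-- ===== VERDICT (by name: the statement is the Claim_ definition above) =====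
theorem nou_cost_spec : Claim_equal_nou_cost := by
  intro sol millores idx ce ne _dom _pre
  show nou_cost sol millores idx ce ne = nou_cost_alt sol millores idx ce ne
  simp only [nou_cost, nou_cost_alt]
  rw [pv_maxne_eq]
  have hmax := PySem.List.le_foldl_max_int (List.range ce.length) (fun i => ne.getD i 0) 0
  have hdepth : (if pvMax ne ce.length < idx + 1 then pvMax ne ce.length else idx + 1)
      = min (pvMax ne ce.length) (idx + 1) := by split <;> omega
  rw [hdepth, PySem.List.pyRange_one, List.foldl_map]
  simp only [zero_add, sub_zero, ← pvF_eq]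
  apply PySem.List.foldl_congr_mem
  intro acc i hmem
  have hiM : i < ce.length := List.mem_range.mp hmem
  have hne : ne.getD i 0 ≤ pvMax ne ce.length := hmax.2 i hmem
  have h0 : (0 : Int) ≤ pvMax ne ce.length := hmax.1
  rw [pv_A_station, pv_occ_spec sol millores idx ne ce.length _ i hiM]
  rw [pv_sum_ite_take (fun k => pvF sol millores (idx - (k : Int)) i)
        (fun k => ne.getD i 0 > (k : Int))
        ((min (pvMax ne ce.length) (idx + 1)).toNat)
        ((min (ne.getD i 0) (idx + 1)).toNat)
        (by omega) (by intro k hk; constructor <;> intro h <;> omega)]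
  have hmaxite : ∀ x : Int, max 0 x = if x < 0 then 0 else x := by
    intro x; split <;> omega
  rw [hmaxite]
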